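-- pv_equiv track=rewrite | github.com/MXBraisedFish/tui-game | hash.py | sanitize_segment
-- ===== SOURCE A (Python) =====
-- def sanitize_segment(raw: str, fallback: str) -> str:
--     out = []
--     last_sep = False
--     for ch in raw.strip():
--         if ch.isalnum():
--             mapped = ch.lower()
--         elif ch in "_-. ":
--             mapped = "_"
--         else:
--             continue
--         if mapped == "_":
--             if last_sep or not out:
--                 continue
--             last_sep = True
--         else:
--             last_sep = False
--         out.append(mapped)
--     value = "".join(out).strip("_")
--     return value or fallback.lower()
-- ===== SOURCE B (Python) =====
-- def sanitize_segment(raw: str, fallback: str) -> str: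
--     # Phase 1: map each kept character (no separator state).
--     mapped = "".join(
--         ch.lower() if ch.isalnum() else "_"
--         for ch in raw.strip()
--         if ch.isalnum() or ch in "_-. "
--     )
--     # Phase 2: collapse separator runs and trim ends by split/join.
--     value = "_".join(part for part in mapped.split("_") if part)
--     return value or fallback.lower()
-- ===== Notes on version B (the rewrite author's own statement) =====
-- stated objective: simpler
-- what changed: Replaces the per-character last_sep/out state machine by a stateless two-phase pipeline: one comprehension maps/keeps characters, then split('_')/filter/join collapses separator runs and trims the ends.
import Mathlib
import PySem

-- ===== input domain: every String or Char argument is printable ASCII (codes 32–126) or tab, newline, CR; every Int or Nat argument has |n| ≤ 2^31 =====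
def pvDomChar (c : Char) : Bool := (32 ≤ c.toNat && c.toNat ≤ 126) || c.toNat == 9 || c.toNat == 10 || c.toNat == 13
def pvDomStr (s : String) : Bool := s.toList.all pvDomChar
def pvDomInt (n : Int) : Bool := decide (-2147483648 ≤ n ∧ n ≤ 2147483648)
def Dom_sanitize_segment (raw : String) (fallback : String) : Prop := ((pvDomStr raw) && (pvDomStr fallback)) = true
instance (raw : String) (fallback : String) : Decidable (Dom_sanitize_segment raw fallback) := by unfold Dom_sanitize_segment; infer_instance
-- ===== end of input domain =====

-- B replaces A's last_sep/out state machine by a stateless map phase followed by a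
-- split-on-'_' / drop-empties / join collapse phase (objective: simpler).

-- ===== PORT A =====
def sanitize_segment (raw : String) (fallback : String) : String :=
  let r := (PySem.Str.strip raw).toList.foldl
    (fun (st : List Char × Bool) ch =>
      -- mapped = ch.lower() / "_" / continue (continue = none)
      let mappedOpt : Option Char :=
        if PySem.Chars.isalnum ch then some (PySem.Chars.lowerChar ch)
        else if ch ∈ ['_', '-', '.', ' '] then some '_'
        else none
      match mappedOpt with
      | none => st
      | some mapped =>
        if mapped = '_' then
          if st.2 || st.1.isEmpty then st else (st.1 ++ ['_'], true)
        else (st.1 ++ [mapped], false))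
    ([], false)
  let value := PySem.Chars.stripChars r.1 ['_']
  if value.isEmpty then PySem.Str.lower fallback else String.ofList value

-- ===== PORT B =====
def sanitize_segment_alt (raw : String) (fallback : String) : String :=
  let mapped := (PySem.Str.strip raw).toList.filterMap
    (fun ch =>
      if PySem.Chars.isalnum ch || ch ∈ ['_', '-', '.', ' '] then
        some (if PySem.Chars.isalnum ch then PySem.Chars.lowerChar ch else '_')
      else none)
  let value := PySem.Chars.join ['_']
    ((PySem.Chars.splitOn mapped ['_']).filter (fun part => !part.isEmpty))
  if value.isEmpty then PySem.Str.lower fallback else String.ofList value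

-- ===== PRECONDITION & SPEC =====
def Spec_sanitize_segment (raw : String) (fallback : String) (out : String) : Prop := out = sanitize_segment_alt raw fallback
instance (raw : String) (fallback : String) (out : String) : Decidable (Spec_sanitize_segment raw fallback out) := by unfold Spec_sanitize_segment; infer_instance

-- ===== CLAIM (what is proved, stated in full; the proofs are below) =====
def Claim_equal_sanitize_segment : Prop := ∀ (raw : String) (fallback : String), Dom_sanitize_segment raw fallback → Spec_sanitize_segment raw fallback (sanitize_segment raw fallback)

-- ===== LEMMAS AND PROOFS =====

/-- separator predicate -/
def isSep (c : Char) : Bool := c == '_'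

/-- the character mapping both programs apply to each kept character -/
def mapChar (ch : Char) : Option Char :=
  if PySem.Chars.isalnum ch then some (PySem.Chars.lowerChar ch)
  else if ch ∈ ['_', '-', '.', ' '] then some '_'
  else none

/-- A's loop body, seen on the mapped character -/
def stepM (st : List Char × Bool) (c : Char) : List Char × Bool :=
  if c = '_' then
    if st.2 || st.1.isEmpty then st else (st.1 ++ ['_'], true)
  else (st.1 ++ [c], false)

/-- collapse runs of '_' to a single '_' (proof-only model of phase 2's collapse) -/
def collapse : List Char → List Char
  | [] => []
  | [c] => [c]
  | a :: b :: t => if a == '_' && b == '_' then collapse (b :: t) else a :: collapse (b :: t)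

/-- structural split on '_' (proof-only model of PySem.Chars.splitOn · ['_']) -/
def mysplit : List Char → List (List Char)
  | [] => [[]]
  | c :: t => if c == '_' then [] :: mysplit t else (mysplit t).modifyHead (c :: ·)

theorem char_le_toNat (a b : Char) : a ≤ b ↔ a.toNat ≤ b.toNat :=
  ⟨fun h => Fin.mk_le_mk.mp h, fun h => Fin.mk_le_mk.mpr h⟩

theorem char_toNat_ofNat (n : Nat) (h : n.isValidChar) : (Char.ofNat n).toNat = n := by
  unfold Char.ofNat
  split
  · rfl
  · contradiction

theorem isalnum_lower_ne_sep (ch : Char) (h : PySem.Chars.isalnum ch = true) :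
    PySem.Chars.lowerChar ch ≠ '_' := by
  have key : 65 ≤ ch.toNat ∧ ch.toNat ≤ 90 ∨ 97 ≤ ch.toNat ∧ ch.toNat ≤ 122 ∨
      48 ≤ ch.toNat ∧ ch.toNat ≤ 57 := by
    simp only [PySem.Chars.isalnum, PySem.Chars.isalpha, PySem.Chars.isdigit, PySem.Chars.isupper,
      PySem.Chars.islower, Bool.or_eq_true, Bool.and_eq_true, decide_eq_true_eq,
      char_le_toNat] at h
    simpa [show ('A').toNat = 65 from rfl, show ('Z').toNat = 90 from rfl,
      show ('a').toNat = 97 from rfl, show ('z').toNat = 122 from rfl,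
      show ('0').toNat = 48 from rfl, show ('9').toNat = 57 from rfl, or_assoc] using h
  intro hEq
  rw [PySem.Chars.lowerChar] at hEq
  have hU : ('_').toNat = 95 := rfl
  split at hEq
  · rename_i hu
    have hu' : 65 ≤ ch.toNat ∧ ch.toNat ≤ 90 := by
      simp only [PySem.Chars.isupper, Bool.and_eq_true, decide_eq_true_eq, char_le_toNat] at hu
      simpa [show ('A').toNat = 65 from rfl, show ('Z').toNat = 90 from rfl] using hu
    have hv : ((ch.toNat + 32 : Nat)).isValidChar := Or.inl (by omega)
    have h2 := congrArg Char.toNat hEq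
    rw [char_toNat_ofNat _ hv] at h2
    omega
  · have h2 := congrArg Char.toNat hEq
    omega

theorem foldl_eq_machine (s : List Char) (st : List Char × Bool) :
    s.foldl
      (fun (st : List Char × Bool) ch =>
        let mappedOpt : Option Char :=
          if PySem.Chars.isalnum ch then some (PySem.Chars.lowerChar ch)
          else if ch ∈ ['_', '-', '.', ' '] then some '_'
          else none
        match mappedOpt with
        | none => st
        | some mapped =>
          if mapped = '_' then
            if st.2 || st.1.isEmpty then st else (st.1 ++ ['_'], true)
          else (st.1 ++ [mapped], false)) st
    = (s.filterMap mapChar).foldl stepM st := by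
  induction s generalizing st with
  | nil => rfl
  | cons ch t ih =>
    rw [List.foldl_cons, ih, List.filterMap_cons]
    by_cases ha : PySem.Chars.isalnum ch = true
    · have hne := isalnum_lower_ne_sep ch ha
      rw [show mapChar ch = some (PySem.Chars.lowerChar ch) from by simp [mapChar, ha]]
      simp only [ha, if_true]
      rw [if_neg hne, List.foldl_cons]
      congr 1
      simp [stepM, hne]
    · by_cases hm : ch ∈ ['_', '-', '.', ' ']
      · rw [show mapChar ch = some '_' from by simp [mapChar, ha, hm]]
        rw [if_neg ha, if_pos hm, List.foldl_cons]
        congr 1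
      · rw [show mapChar ch = none from by simp [mapChar, ha, hm]]
        rw [if_neg ha, if_neg hm]

theorem collapse_cons_ne (c : Char) (t : List Char) (h : ¬ c = '_') :
    collapse (c :: t) = c :: collapse t := by
  cases t with
  | nil => rfl
  | cons b r => simp [collapse, h]

theorem collapse_cons_sep (t : List Char) :
    collapse ('_' :: t) = '_' :: collapse (t.dropWhile isSep) := by
  induction t with
  | nil => rfl
  | cons b r ih =>
    by_cases hb : b = '_'
    · subst hb
      simpa [collapse, List.dropWhile, isSep] using ih
    · have hb' : (b == '_') = false := by simp [hb]
      simp [collapse, List.dropWhile, isSep, hb']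

theorem dropWhile_collapse_self (u : List Char) (h : u.head? ≠ some '_') :
    (collapse u).dropWhile isSep = collapse u := by
  cases u with
  | nil => rfl
  | cons x xs =>
    have hx : ¬ x = '_' := by simpa using h
    have hx' : (x == '_') = false := by simp [hx]
    rw [collapse_cons_ne _ _ hx]
    simp [List.dropWhile, isSep, hx']

theorem collapse_dropWhile (t : List Char) :
    collapse (t.dropWhile isSep) = (collapse t).dropWhile isSep := by
  induction t with
  | nil => rfl
  | cons b r ih =>
    by_cases hb : b = '_'
    · subst hb
      rw [collapse_cons_sep]
      have h1 : List.dropWhile isSep ('_' :: r) = List.dropWhile isSep r := by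
        simp [List.dropWhile, isSep]
      have h2 : List.dropWhile isSep ('_' :: collapse (List.dropWhile isSep r))
          = List.dropWhile isSep (collapse (List.dropWhile isSep r)) := by
        simp [List.dropWhile, isSep]
      rw [h1, h2, dropWhile_collapse_self _ ?hh]
      case hh =>
        cases hd : List.dropWhile isSep r with
        | nil => simp
        | cons x xs =>
          have hne : List.dropWhile isSep r ≠ [] := by simp [hd]
          have := List.head_dropWhile_not isSep hne
          simp only [hd, List.head_cons, List.head?_cons, isSep, ne_eq, Option.some.injEq] at this ⊢
          simp at this
          simp [this]
    · have hb' : (b == '_') = false := by simp [hb]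
      rw [collapse_cons_ne _ _ hb]
      simp [List.dropWhile, isSep, hb', collapse_cons_ne _ _ hb]

theorem machine_acc (m : List Char) :
    ∀ out : List Char, out ≠ [] →
      ((m.foldl stepM (out, false)).1 = out ++ collapse m ∧
       (m.foldl stepM (out, true)).1 = out ++ collapse (m.dropWhile isSep)) := by
  induction m with
  | nil => intro out _; simp [collapse]
  | cons c t ih =>
    intro out hout
    by_cases hc : c = '_'
    · subst hc
      constructor
      · have hstep : stepM (out, false) '_' = (out ++ ['_'], true) := by
          simp [stepM, hout]
        rw [List.foldl_cons, hstep, (ih (out ++ ['_']) (by simp)).2, collapse_cons_sep]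
        simp
      · have hstep : stepM (out, true) '_' = (out, true) := by simp [stepM]
        rw [List.foldl_cons, hstep, (ih out hout).2]
        simp [List.dropWhile, isSep]
    · have hstep : ∀ b, stepM (out, b) c = (out ++ [c], false) := by
        intro b; simp [stepM, hc]
      constructor
      · rw [List.foldl_cons, hstep, (ih (out ++ [c]) (by simp)).1, collapse_cons_ne _ _ hc]
        simp
      · rw [List.foldl_cons, hstep, (ih (out ++ [c]) (by simp)).1]
        have hc' : (c == '_') = false := by simp [hc]
        have : List.dropWhile isSep (c :: t) = c :: t := by
          simp [List.dropWhile, isSep, hc']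
        rw [this, collapse_cons_ne _ _ hc]
        simp

theorem machine_init (m : List Char) :
    (m.foldl stepM ([], false)).1 = (collapse m).dropWhile isSep := by
  induction m with
  | nil => rfl
  | cons c t ih =>
    by_cases hc : c = '_'
    · subst hc
      have hstep : stepM (([] : List Char), false) '_' = ([], false) := by simp [stepM]
      rw [List.foldl_cons, hstep, ih, collapse_cons_sep]
      have : List.dropWhile isSep ('_' :: collapse (List.dropWhile isSep t))
          = List.dropWhile isSep (collapse (List.dropWhile isSep t)) := by
        simp [List.dropWhile, isSep]
      rw [this, collapse_dropWhile, List.dropWhile_idempotent]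
    · have hstep : stepM (([] : List Char), false) c = ([c], false) := by simp [stepM, hc]
      rw [List.foldl_cons, hstep, (machine_acc t [c] (by simp)).1, collapse_cons_ne _ _ hc]
      have hc' : (c == '_') = false := by simp [hc]
      simp [List.dropWhile, isSep, hc']

theorem mysplit_ne_nil (t : List Char) : mysplit t ≠ [] := by
  induction t with
  | nil => simp [mysplit]
  | cons c r ih =>
    simp only [mysplit]
    split
    · simp
    · cases h : mysplit r with
      | nil => exact absurd h ih
      | cons a b => simp [List.modifyHead]

theorem splitOn_go_eq (fuel : Nat) :
    ∀ (t cur : List Char) (acc : List (List Char)), t.length < fuel →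
      PySem.Chars.splitOn.go ['_'] fuel t cur acc
        = acc.reverse ++ (mysplit t).modifyHead (cur.reverse ++ ·) := by
  induction fuel with
  | zero => intro t cur acc h; omega
  | succ fuel ih =>
    intro t cur acc h
    cases t with
    | nil =>
      simp [PySem.Chars.splitOn.go, mysplit, List.modifyHead]
    | cons c rest =>
      rw [PySem.Chars.splitOn.go]
      by_cases hc : c = '_'
      · subst hc
        have hpre : (['_'] : List Char).isPrefixOf ('_' :: rest) = true := by
          simp [List.isPrefixOf]
        simp only [hpre, if_true, List.length_cons] at *
        have hdrop : List.drop (List.length ([] : List Char) + 1) ('_' :: rest) = rest := by simp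
        rw [hdrop, ih rest [] (cur.reverse :: acc) (by omega)]
        simp only [mysplit, beq_self_eq_true, if_true, List.modifyHead_cons,
          List.reverse_cons, List.reverse_nil, List.nil_append]
        simp only [List.append_assoc, List.singleton_append, List.append_cancel_left_eq]
        cases hm : mysplit rest with
        | nil => exact absurd hm (mysplit_ne_nil rest)
        | cons a b => simp [List.modifyHead]
      · have hpre : (['_'] : List Char).isPrefixOf (c :: rest) = false := by
          simp [List.isPrefixOf]
          exact fun hcon => absurd hcon.symm hc
        simp only [hpre, Bool.false_eq_true, if_false]
        rw [ih rest (c :: cur) acc (by simp at h; omega)]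
        have hc' : (c == '_') = false := by simp [hc]
        simp only [mysplit, hc', Bool.false_eq_true, if_false]
        cases hm : mysplit rest with
        | nil => exact absurd hm (mysplit_ne_nil rest)
        | cons a b =>
          simp [List.modifyHead]

theorem splitOn_eq_mysplit (s : List Char) :
    PySem.Chars.splitOn s ['_'] = mysplit s := by
  rw [PySem.Chars.splitOn, splitOn_go_eq (s.length + 1) s [] [] (by omega)]
  cases hm : mysplit s with
  | nil => exact absurd hm (mysplit_ne_nil s)
  | cons a b => simp [List.modifyHead]

theorem contains_sep (c : Char) : (['_'] : List Char).contains c = isSep c := by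
  rw [List.contains_cons]
  simp [isSep]

theorem stripChars_eq (u : List Char) :
    PySem.Chars.stripChars u ['_']
      = List.rdropWhile isSep (List.dropWhile isSep u) := by
  have hp : (fun c => (['_'] : List Char).contains c) = isSep := funext contains_sep
  show (List.dropWhile _ (List.dropWhile _ u).reverse).reverse = _
  rw [hp, List.rdropWhile]

theorem rdrop_cons_of_ne_nil (c : Char) (u : List Char)
    (h : List.rdropWhile isSep u ≠ []) :
    List.rdropWhile isSep (c :: u) = c :: List.rdropWhile isSep u := by
  have hne : List.dropWhile isSep u.reverse ≠ [] := by
    intro hh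
    exact h (by simp [List.rdropWhile, hh])
  rw [List.rdropWhile, show (c :: u).reverse = u.reverse ++ [c] from by simp,
    List.dropWhile_append]
  rw [if_neg (by simpa [List.isEmpty_iff] using hne)]
  simp [List.rdropWhile]

theorem rdrop_cons_ne (c : Char) (u : List Char) (hc : isSep c = false) :
    List.rdropWhile isSep (c :: u) = c :: List.rdropWhile isSep u := by
  by_cases h : List.rdropWhile isSep u = []
  · have hall : ∀ x ∈ u, isSep x = true := List.rdropWhile_eq_nil_iff.mp h
    rw [List.rdropWhile, show (c :: u).reverse = u.reverse ++ [c] from by simp,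
      List.dropWhile_append]
    have hdrop : List.dropWhile isSep u.reverse = [] := by
      rw [List.dropWhile_eq_nil_iff]
      intro x hx; exact hall x (by simpa using hx)
    rw [if_pos (by simp [hdrop])]
    simp [List.dropWhile, hc, h]
  · exact rdrop_cons_of_ne_nil c u h

theorem join_ne_nil (a : List Char) (l : List (List Char)) (ha : a ≠ []) :
    PySem.Chars.join ['_'] (a :: l) ≠ [] := by
  cases l with
  | nil => simpa [PySem.Chars.join_singleton] using ha
  | cons b r =>
    rw [PySem.Chars.join_cons_cons]
    cases a with
    | nil => exact absurd rfl ha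
    | cons x xs => simp

theorem join_cons_head (c : Char) (h : List Char) (l : List (List Char)) :
    PySem.Chars.join ['_'] ((c :: h) :: l) = c :: PySem.Chars.join ['_'] (h :: l) := by
  cases l with
  | nil => rw [PySem.Chars.join_singleton, PySem.Chars.join_singleton]
  | cons b r => rw [PySem.Chars.join_cons_cons, PySem.Chars.join_cons_cons]; simp

theorem pq (m : List Char) :
    PySem.Chars.join ['_'] ((mysplit m).filter (fun part => !part.isEmpty))
        = List.rdropWhile isSep (List.dropWhile isSep (collapse m)) ∧
    PySem.Chars.join ['_'] ((mysplit m).headI :: (mysplit m).tail.filter (fun part => !part.isEmpty))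
        = List.rdropWhile isSep (collapse m) := by
  induction m with
  | nil =>
    constructor
    · simp [mysplit, collapse, PySem.Chars.join_nil, List.rdropWhile]
    · simp [mysplit, collapse, PySem.Chars.join_singleton, List.rdropWhile]
  | cons c t ih =>
    obtain ⟨ihP, ihQ⟩ := ih
    by_cases hc : c = '_'
    · subst hc
      have hsplit : mysplit ('_' :: t) = [] :: mysplit t := by simp [mysplit]
      have hcol := collapse_cons_sep t
      have hdw : List.dropWhile isSep ('_' :: collapse (List.dropWhile isSep t))
          = List.dropWhile isSep (collapse (List.dropWhile isSep t)) := by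
        simp [List.dropWhile, isSep]
      constructor
      · rw [hsplit, hcol]
        have hfe : List.filter (fun part => !part.isEmpty) ([] :: mysplit t)
            = List.filter (fun part => !part.isEmpty) (mysplit t) := by simp [List.filter]
        rw [hfe, ihP, hdw, collapse_dropWhile, List.dropWhile_idempotent]
      · rw [hsplit, hcol]
        simp only [List.headI, List.tail_cons]
        cases hf : List.filter (fun part => !part.isEmpty) (mysplit t) with
        | nil =>
          rw [PySem.Chars.join_singleton]
          have hP0 : List.rdropWhile isSep (List.dropWhile isSep (collapse t)) = [] := by
            rw [← ihP, hf, PySem.Chars.join_nil]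
          have hdw0 : List.dropWhile isSep (collapse t) = [] := by
            cases hd : List.dropWhile isSep (collapse t) with
            | nil => rfl
            | cons x xs =>
              have hne : List.dropWhile isSep (collapse t) ≠ [] := by simp [hd]
              have hx := List.head_dropWhile_not isSep hne
              rw [hd] at hP0
              exfalso
              have hxall := List.rdropWhile_eq_nil_iff.mp hP0 x (by simp)
              simp only [hd, List.head_cons] at hx
              rw [hxall] at hx
              exact Bool.true_eq_false.mp hx
          rw [collapse_dropWhile, hdw0]
          decide
        | cons a b =>
          rw [show (([] : List Char) :: a :: b) = [] :: a :: b from rfl,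
            PySem.Chars.join_cons_cons]
          rw [← hf, ihP]
          have hane : a ≠ [] := by
            have := List.mem_filter.mp (hf ▸ List.mem_cons_self (l := b))
            simpa [List.isEmpty_iff] using this.2
          have hne : List.rdropWhile isSep (List.dropWhile isSep (collapse t)) ≠ [] := by
            rw [← ihP, hf]
            exact join_ne_nil a b hane
          rw [collapse_dropWhile, rdrop_cons_of_ne_nil _ _ hne]
          simp
    · have hc' : (c == '_') = false := by simp [hc]
      have hsplit : mysplit (c :: t) = (mysplit t).modifyHead (c :: ·) := by
        simp [mysplit, hc']
      obtain ⟨h0, t0, hm⟩ : ∃ h0 t0, mysplit t = h0 :: t0 := by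
        cases hq : mysplit t with
        | nil => exact absurd hq (mysplit_ne_nil t)
        | cons a b => exact ⟨_, _, rfl⟩
      have hQ' : PySem.Chars.join ['_'] (h0 :: t0.filter (fun part => !part.isEmpty))
          = List.rdropWhile isSep (collapse t) := by
        simpa [hm] using ihQ
      have hdwc : List.dropWhile isSep (c :: collapse t) = c :: collapse t := by
        simp [List.dropWhile, isSep, hc']
      have hsc : isSep c = false := by simp [isSep, hc']
      constructor
      · rw [hsplit, hm, List.modifyHead_cons]
        rw [List.filter_cons_of_pos (by simp)]
        rw [join_cons_head, hQ']
        rw [collapse_cons_ne _ _ hc, hdwc, rdrop_cons_ne _ _ hsc]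
      · rw [hsplit, hm, List.modifyHead_cons]
        simp only [List.headI, List.tail_cons]
        rw [join_cons_head, hQ', collapse_cons_ne _ _ hc, rdrop_cons_ne _ _ hsc]

-- ===== VERDICT (by name: the statement is the Claim_ definition above) =====
theorem sanitize_segment_spec : Claim_equal_sanitize_segment := by
  intro raw fallback _
  unfold Spec_sanitize_segment sanitize_segment sanitize_segment_alt
  have hmap : (fun ch => if PySem.Chars.isalnum ch || ch ∈ ['_', '-', '.', ' '] then
      some (if PySem.Chars.isalnum ch then PySem.Chars.lowerChar ch else '_')
      else none) = mapChar := by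
    funext ch
    by_cases ha : PySem.Chars.isalnum ch = true
    · simp [mapChar, ha]
    · by_cases hm : ch ∈ ['_', '-', '.', ' '] <;> simp [mapChar, ha, hm]
  simp only [hmap, foldl_eq_machine, machine_init, stripChars_eq, splitOn_eq_mysplit,
    List.dropWhile_idempotent, (pq ((PySem.Str.strip raw).toList.filterMap mapChar)).1]
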